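-- pv_equiv track=rewrite | github.com/goyalpushkar/PythonGeneric | PSWAlgorithms/src/main/py/com/algo/algos/OutCo_GeeksForGeeks_NthPowerNumber.py | nth_power_num_long
-- ===== SOURCE A (Python) =====
-- def nth_power_num_long(n):
--     # limit = math.sqrt(n)
--
--     # nth power number will be at max square of (n+1) e.g. 10th power number at max will be 11^2 = 121
--     limit = pow((n+1),2)
--     num_list = set()
--     for i in range(2, n+2):
--         for po in range(2,100):
--             numb = pow(i, po)
--             if numb < limit:
--                 num_list.add(numb)
--             else:
--                 break
--
--     # num_list = set(num_list)
--     num_list = sorted(num_list)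
--
--     return num_list[:n], num_list[n-1]
-- ===== SOURCE B (Python) =====
-- def nth_power_num_long(n):
--     limit = (n + 1) * (n + 1)
--     # all perfect powers with exponent >= 3 below limit: only O(limit^(1/3)) bases
--     highers = set()
--     b = 2
--     while b * b * b < limit:
--         v = b * b * b
--         while v < limit:
--             highers.add(v)
--             v *= b
--         b += 1
--     hs = sorted(highers)
--     # the squares below limit are already sorted: 2^2 .. n^2
--     squares = [i * i for i in range(2, n + 1)]
--     # merge the two sorted lists, dropping duplicates across them
--     merged = []
--     i = j = 0
--     while i < len(squares) and j < len(hs):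
--         if squares[i] < hs[j]:
--             merged.append(squares[i]); i += 1
--         elif hs[j] < squares[i]:
--             merged.append(hs[j]); j += 1
--         else:
--             merged.append(squares[i]); i += 1; j += 1
--     merged.extend(squares[i:])
--     merged.extend(hs[j:])
--     return merged[:n], merged[n - 1]
-- ===== Notes on version B (the rewrite author's own statement) =====
-- stated objective: faster
-- what changed: Instead of collecting all ~n powers into a set and sorting it, B generates the few (O(n^{2/3})) powers with exponent >= 3, sorts only those, and merges them with the already-sorted stream of squares, deduplicating during the merge.
import Mathlib
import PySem

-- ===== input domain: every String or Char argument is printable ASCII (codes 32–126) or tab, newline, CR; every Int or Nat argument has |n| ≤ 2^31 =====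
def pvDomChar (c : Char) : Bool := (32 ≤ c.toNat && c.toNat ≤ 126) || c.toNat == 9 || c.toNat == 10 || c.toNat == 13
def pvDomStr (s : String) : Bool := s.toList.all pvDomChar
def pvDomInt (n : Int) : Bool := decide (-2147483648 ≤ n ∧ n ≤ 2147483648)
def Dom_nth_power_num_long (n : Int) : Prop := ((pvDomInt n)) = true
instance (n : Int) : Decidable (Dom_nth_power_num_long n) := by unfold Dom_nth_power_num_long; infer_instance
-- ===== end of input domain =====

-- B replaces "collect every power into one set and sort it" by "merge the sorted stream of
-- squares with the sorted short list of higher (exponent ≥ 3) powers, deduplicating on the fly".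

-- ===== PORT A =====
-- inner 'for po in range(2,100)' with break
def pvInnerA (i L : Int) : List Int → PySem.Set Int → PySem.Set Int
  | [], s => s
  | po :: rest, s =>
      if i ^ po.toNat < L then pvInnerA i L rest (PySem.Set.add s (i ^ po.toNat)) else s

def nth_power_num_long (n : Int) : List Int × Int :=
  let limit := (n + 1) ^ 2
  let num_list :=
    (PySem.List.pyRange 2 (n + 2) 1).foldl
      (fun s i => pvInnerA i limit (PySem.List.pyRange 2 100 1) s) PySem.Set.empty
  let sortedList := PySem.List.sorted num_list (fun x => x) false
  (PySem.List.slice sortedList none (some n),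
   (PySem.List.pyGet? sortedList (n - 1)).getD 0)  -- n-1 in range whenever Pre_ holds; default never used there

-- ===== PORT B =====
-- inner 'while v < limit: highers.add(v); v *= b' (guard '2 ≤ b ∧ 1 ≤ v' only makes it total;
-- every call site satisfies it)
def pvPowRun (L b v : Int) (s : PySem.Set Int) : PySem.Set Int :=
  if h : 2 ≤ b ∧ 1 ≤ v ∧ v < L then pvPowRun L b (v * b) (PySem.Set.add s v) else s
  termination_by (L - v).toNat
  decreasing_by
    obtain ⟨hb, hv, hvL⟩ := h
    have : v + 1 ≤ v * b := by nlinarith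
    omega

-- outer 'while b*b*b < limit' (guard '2 ≤ b' only makes it total)
def pvHighers (L b : Int) (s : PySem.Set Int) : PySem.Set Int :=
  if h : 2 ≤ b ∧ b * b * b < L then pvHighers L (b + 1) (pvPowRun L b (b * b * b) s) else s
  termination_by (L - b * b * b).toNat
  decreasing_by
    obtain ⟨hb, hbL⟩ := h
    have : b * b * b + 1 ≤ (b + 1) * (b + 1) * (b + 1) := by nlinarith
    omega

-- the merge-with-dedup loop, consuming the two sorted lists
def pvMerge : List Int → List Int → List Int
  | [], ys => ys
  | x :: xs, [] => x :: xs
  | x :: xs, y :: ys =>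
      if x < y then x :: pvMerge xs (y :: ys)
      else if y < x then y :: pvMerge (x :: xs) ys
      else x :: pvMerge xs ys

def nth_power_num_long_alt (n : Int) : List Int × Int :=
  let limit := (n + 1) * (n + 1)
  let hs := PySem.List.sorted (pvHighers limit 2 PySem.Set.empty) (fun x => x) false
  let squares := (PySem.List.pyRange 2 (n + 1) 1).map (fun i => i * i)
  let merged := pvMerge squares hs
  (PySem.List.slice merged none (some n),
   (PySem.List.pyGet? merged (n - 1)).getD 0)

-- ===== PRECONDITION & SPEC =====
-- For n ≤ 1 the collected set is empty and A's 'num_list[n-1]' raises IndexError; for negative n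
-- the ranges are empty as well and the same subscript raises. Pre_ keeps exactly the returning inputs.
def Pre_nth_power_num_long (n : Int) : Prop := 2 ≤ n
instance (n : Int) : Decidable (Pre_nth_power_num_long n) := by unfold Pre_nth_power_num_long; infer_instance
def pvWitness_nth_power_num_long : Int := 5

def Spec_nth_power_num_long (n : Int) (out : List Int × Int) : Prop := out = nth_power_num_long_alt n
instance (n : Int) (out : List Int × Int) : Decidable (Spec_nth_power_num_long n out) := by unfold Spec_nth_power_num_long; infer_instance

-- ===== CLAIM (what is proved, stated in full; the proofs are below) =====
def Claim_equal_nth_power_num_long : Prop := ∀ (n : Int), Dom_nth_power_num_long n → Pre_nth_power_num_long n → Spec_nth_power_num_long n (nth_power_num_long n)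

-- ===== LEMMAS AND PROOFS =====

-- "x is a perfect power below L"
def pvIsPow (L x : Int) : Prop := ∃ b : Int, ∃ p : Nat, 2 ≤ b ∧ 2 ≤ p ∧ x = b ^ p ∧ x < L


lemma pvInnerA_nodup (i L : Int) : ∀ (l : List Int) (s : PySem.Set Int), s.Nodup → (pvInnerA i L l s).Nodup := by
  intro l
  induction l with
  | nil => intro s hs; simpa [pvInnerA] using hs
  | cons po rest ih =>
      intro s hs
      simp only [pvInnerA]
      split
      · exact ih _ (PySem.Set.nodup_add _ _ hs)
      · exact hs

lemma pvPairwise_lt_of_le_nodup (l : List Int) (h : l.Pairwise (· ≤ ·)) (hn : l.Nodup) :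
    l.Pairwise (· < ·) := by
  exact (h.and hn).imp (fun ⟨hle, hne⟩ => lt_of_le_of_ne hle hne)

lemma pvInnerA_mem (i L : Int) (hi : 2 ≤ i) :
    ∀ (k : Nat) (a : Int), 2 ≤ a → (100 - a).toNat ≤ k →
      ∀ (s : PySem.Set Int) (x : Int),
        (x ∈ pvInnerA i L (PySem.List.pyRange a 100 1) s ↔
          x ∈ s ∨ ∃ p : Nat, a ≤ (p : Int) ∧ p < 100 ∧ x = i ^ p ∧ x < L) := by
  intro k
  induction k with
  | zero =>
      intro a ha hk s x
      have h100 : (100:Int) ≤ a := by omega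
      rw [PySem.List.pyRange_one_eq_nil h100]
      simp only [pvInnerA]
      constructor
      · exact Or.inl
      · rintro (h | ⟨p, hp1, hp2, _⟩)
        · exact h
        · omega
  | succ k ih =>
      intro a ha hk s x
      by_cases hlt : a < 100
      · rw [PySem.List.pyRange_one_cons hlt]
        simp only [pvInnerA]
        split
        · next hbr =>
            rw [ih (a+1) (by omega) (by omega)]
            have hmem := PySem.Set.mem_add (s := s) (x := i ^ a.toNat) (y := x)
            rw [hmem]
            constructor
            · rintro ((h | rfl) | ⟨p, hp1, hp2, rfl, hpl⟩)
              · exact Or.inl h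
              · exact Or.inr ⟨a.toNat, by omega, by omega, rfl, hbr⟩
              · exact Or.inr ⟨p, by omega, hp2, rfl, hpl⟩
            · rintro (h | ⟨p, hp1, hp2, rfl, hpl⟩)
              · exact Or.inl (Or.inl h)
              · by_cases hpa : (p : Int) = a
                · refine Or.inl (Or.inr ?_)
                  have : p = a.toNat := by omega
                  subst this; rfl
                · exact Or.inr ⟨p, by omega, hp2, rfl, hpl⟩
        · next hbr =>
            rw [not_lt] at hbr
            constructor
            · exact Or.inl
            · rintro (h | ⟨p, hp1, hp2, rfl, hpl⟩)
              · exact h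
              · exfalso
                have h1 : i ^ a.toNat ≤ i ^ p := by
                  apply pow_le_pow_right₀ (by omega) (by omega)
                omega
      · have h100 : (100:Int) ≤ a := by omega
        rw [PySem.List.pyRange_one_eq_nil h100]
        simp only [pvInnerA]
        constructor
        · exact Or.inl
        · rintro (h | ⟨p, hp1, hp2, _⟩)
          · exact h
          · omega

lemma pvFoldA_nodup (L : Int) (l : List Int) :
    ∀ (s : PySem.Set Int), s.Nodup →
      (l.foldl (fun s i => pvInnerA i L (PySem.List.pyRange 2 100 1) s) s).Nodup := by
  induction l with
  | nil => intro s hs; simpa using hs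
  | cons a rest ih =>
      intro s hs
      simp only [List.foldl_cons]
      exact ih _ (pvInnerA_nodup a L _ s hs)

lemma pvFoldA_mem (L hi : Int) :
    ∀ (k : Nat) (m : Int), 2 ≤ m → (hi - m).toNat ≤ k →
      ∀ (s : PySem.Set Int) (x : Int),
        (x ∈ (PySem.List.pyRange m hi 1).foldl (fun s i => pvInnerA i L (PySem.List.pyRange 2 100 1) s) s ↔
          x ∈ s ∨ ∃ b : Int, m ≤ b ∧ b < hi ∧ ∃ p : Nat, 2 ≤ (p : Int) ∧ p < 100 ∧ x = b ^ p ∧ x < L) := by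
  intro k
  induction k with
  | zero =>
      intro m hm hk s x
      rw [show PySem.List.pyRange m hi 1 = [] from PySem.List.pyRange_one_eq_nil (by omega)]
      simp only [List.foldl_nil]
      constructor
      · exact Or.inl
      · rintro (h | ⟨b, hb1, hb2, _⟩)
        · exact h
        · omega
  | succ k ih =>
      intro m hm hk s x
      by_cases hlt : m < hi
      · rw [PySem.List.pyRange_one_cons hlt]
        simp only [List.foldl_cons]
        rw [ih (m+1) (by omega) (by omega)]
        rw [pvInnerA_mem m L hm 98 2 (by omega) (by omega)]
        constructor
        · rintro ((h | ⟨p, hp1, hp2, rfl, hpl⟩) | ⟨b, hb1, hb2, hrest⟩)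
          · exact Or.inl h
          · exact Or.inr ⟨m, le_refl m, hlt, p, hp1, hp2, rfl, hpl⟩
          · exact Or.inr ⟨b, by omega, hb2, hrest⟩
        · rintro (h | ⟨b, hb1, hb2, p, hp1, hp2, rfl, hpl⟩)
          · exact Or.inl (Or.inl h)
          · by_cases hbm : b = m
            · subst hbm
              exact Or.inl (Or.inr ⟨p, hp1, hp2, rfl, hpl⟩)
            · exact Or.inr ⟨b, by omega, hb2, p, hp1, hp2, rfl, hpl⟩
      · rw [show PySem.List.pyRange m hi 1 = [] from PySem.List.pyRange_one_eq_nil (by omega)]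
        simp only [List.foldl_nil]
        constructor
        · exact Or.inl
        · rintro (h | ⟨b, hb1, hb2, _⟩)
          · exact h
          · omega


lemma pvSetA_mem (n : Int) (h2 : 2 ≤ n) (hub : n ≤ 2147483648) (x : Int) :
    (x ∈ (PySem.List.pyRange 2 (n + 2) 1).foldl
        (fun s i => pvInnerA i ((n + 1) ^ 2) (PySem.List.pyRange 2 100 1) s) PySem.Set.empty ↔
      pvIsPow ((n + 1) ^ 2) x) := by
  rw [pvFoldA_mem ((n+1)^2) (n+2) n.toNat 2 (by omega) (by omega)]
  constructor
  · rintro (h | ⟨b, hb1, hb2, p, hp1, hp2, rfl, hpl⟩)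
    · simp [PySem.Set.empty] at h
    · exact ⟨b, p, hb1, by omega, rfl, hpl⟩
  · rintro ⟨b, p, hb1, hp1, rfl, hpl⟩
    refine Or.inr ⟨b, hb1, ?_, p, by omega, ?_, rfl, hpl⟩
    · -- b < n + 2
      by_contra hb
      rw [not_lt] at hb
      have h1 : b ^ 2 ≤ b ^ p := pow_le_pow_right₀ (by omega) hp1
      have h2' : (n + 1) ^ 2 ≤ b ^ 2 := by nlinarith
      omega
    · -- p < 100
      by_contra hp
      rw [not_lt] at hp
      have h1 : (2:Int) ^ p ≤ b ^ p := pow_le_pow_left₀ (by omega) hb1 p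
      have h2' : (2:Int) ^ 100 ≤ 2 ^ p := pow_le_pow_right₀ (by omega) hp
      have h3 : (n + 1) ^ 2 ≤ (2:Int) ^ 100 := by nlinarith [pow_pos (show (0:Int) < 2 by omega) 100]
      omega


lemma pvMerge_mem : ∀ (xs ys : List Int) (x : Int), x ∈ pvMerge xs ys ↔ x ∈ xs ∨ x ∈ ys := by
  intro xs ys
  fun_induction pvMerge xs ys with
  | case1 ys => simp
  | case2 x xs => simp
  | case3 x xs y ys hxy ih => intro z; simp only [List.mem_cons, ih]; tauto
  | case4 x xs y ys hxy hyx ih => intro z; simp only [List.mem_cons, ih]; tauto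
  | case5 x xs y ys h1 h2 ih =>
      intro z
      have hxy : x = y := le_antisymm (not_lt.mp h2) (not_lt.mp h1)
      subst hxy
      simp only [List.mem_cons, ih]; tauto

lemma pvMerge_pairwise : ∀ (xs ys : List Int), xs.Pairwise (· < ·) → ys.Pairwise (· < ·) →
    (pvMerge xs ys).Pairwise (· < ·) := by
  intro xs ys
  fun_induction pvMerge xs ys with
  | case1 ys => exact fun _ h => h
  | case2 x xs => exact fun h _ => h
  | case3 x xs y ys hxy ih =>
      intro hx hy
      rcases List.pairwise_cons.mp hx with ⟨hx1, hx2⟩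
      refine List.pairwise_cons.mpr ⟨?_, ih hx2 hy⟩
      intro z hz
      rcases (pvMerge_mem xs (y :: ys) z).mp hz with h | h
      · exact hx1 z h
      · rcases List.mem_cons.mp h with rfl | h
        · exact hxy
        · exact lt_trans hxy ((List.pairwise_cons.mp hy).1 z h)
  | case4 x xs y ys hxy hyx ih =>
      intro hx hy
      rcases List.pairwise_cons.mp hy with ⟨hy1, hy2⟩
      refine List.pairwise_cons.mpr ⟨?_, ih hx hy2⟩
      intro z hz
      rcases (pvMerge_mem (x :: xs) ys z).mp hz with h | h
      · rcases List.mem_cons.mp h with rfl | h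
        · exact hyx
        · exact lt_trans hyx ((List.pairwise_cons.mp hx).1 z h)
      · exact hy1 z h
  | case5 x xs y ys h1 h2 ih =>
      have hxy : x = y := le_antisymm (not_lt.mp h2) (not_lt.mp h1)
      subst hxy
      intro hx hy
      rcases List.pairwise_cons.mp hx with ⟨hx1, hx2⟩
      rcases List.pairwise_cons.mp hy with ⟨hy1, hy2⟩
      refine List.pairwise_cons.mpr ⟨?_, ih hx2 hy2⟩
      intro z hz
      rcases (pvMerge_mem xs ys z).mp hz with h | h
      · exact hx1 z h
      · exact hy1 z h



lemma pvPowRun_nodup (L b : Int) : ∀ (v : Int) (s : PySem.Set Int), s.Nodup → (pvPowRun L b v s).Nodup := by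
  intro v s hs
  fun_induction pvPowRun L b v s with
  | case1 v s h ih => exact ih (PySem.Set.nodup_add _ _ hs)
  | case2 v s h => exact hs

lemma pvPowRun_mem (L b : Int) (hb : 2 ≤ b) :
    ∀ (k : Nat) (v : Int), 1 ≤ v → (L - v).toNat ≤ k →
      ∀ (s : PySem.Set Int) (x : Int),
        (x ∈ pvPowRun L b v s ↔ x ∈ s ∨ ∃ j : Nat, x = v * b ^ j ∧ v * b ^ j < L) := by
  intro k
  induction k with
  | zero =>
      intro v hv hk s x
      rw [pvPowRun]
      rw [dif_neg (by omega)]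
      constructor
      · exact Or.inl
      · rintro (h | ⟨j, rfl, hjl⟩)
        · exact h
        · exfalso
          have h1 : v ≤ v * b ^ j := le_mul_of_one_le_right (by omega) (one_le_pow₀ (by omega))
          omega
  | succ k ih =>
      intro v hv hk s x
      by_cases hvL : v < L
      · rw [pvPowRun, dif_pos ⟨hb, hv, hvL⟩]
        have hvb : v + 1 ≤ v * b := by nlinarith
        rw [ih (v * b) (by nlinarith) (by omega)]
        rw [PySem.Set.mem_add]
        constructor
        · rintro ((h | rfl) | ⟨j, rfl, hjl⟩)
          · exact Or.inl h
          · exact Or.inr ⟨0, by ring, by simpa using hvL⟩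
          · exact Or.inr ⟨j + 1, by ring, by rw [show v * b ^ (j+1) = v * b * b ^ j by ring]; exact hjl⟩
        · rintro (h | ⟨j, rfl, hjl⟩)
          · exact Or.inl (Or.inl h)
          · cases j with
            | zero => exact Or.inl (Or.inr (by ring))
            | succ j =>
                refine Or.inr ⟨j, by ring, ?_⟩
                rw [show v * b * b ^ j = v * b ^ (j+1) by ring]
                exact hjl
      · rw [pvPowRun, dif_neg (by omega)]
        constructor
        · exact Or.inl
        · rintro (h | ⟨j, rfl, hjl⟩)
          · exact h
          · exfalso
            have h1 : v ≤ v * b ^ j := le_mul_of_one_le_right (by omega) (one_le_pow₀ (by omega))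
            omega

lemma pvHighers_nodup (L : Int) : ∀ (m : Int) (s : PySem.Set Int), s.Nodup → (pvHighers L m s).Nodup := by
  intro m s hs
  fun_induction pvHighers L m s with
  | case1 m s h ih => exact ih (pvPowRun_nodup _ _ _ _ hs)
  | case2 m s h => exact hs

lemma pvHighers_mem (L : Int) :
    ∀ (k : Nat) (m : Int), 2 ≤ m → (L - m * m * m).toNat ≤ k →
      ∀ (s : PySem.Set Int) (x : Int),
        (x ∈ pvHighers L m s ↔ x ∈ s ∨ ∃ b : Int, m ≤ b ∧ ∃ p : Nat, 3 ≤ p ∧ x = b ^ p ∧ x < L) := by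
  intro k
  induction k with
  | zero =>
      intro m hm hk s x
      rw [pvHighers, dif_neg (by omega)]
      constructor
      · exact Or.inl
      · rintro (h | ⟨b, hmb, p, hp3, rfl, hpl⟩)
        · exact h
        · exfalso
          have ha : m * m ≤ b * b := by nlinarith
          have h1 : m * m * m ≤ b * b * b := by nlinarith
          have h2 : b * b * b = b ^ 3 := by ring
          have h3 : b ^ 3 ≤ b ^ p := pow_le_pow_right₀ (by omega) hp3
          omega
  | succ k ih =>
      intro m hm hk s x
      by_cases hmL : m * m * m < L
      · rw [pvHighers, dif_pos ⟨hm, hmL⟩]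
        have hmm : m * m * m + 1 ≤ (m + 1) * (m + 1) * (m + 1) := by nlinarith
        rw [ih (m + 1) (by omega) (by omega)]
        rw [pvPowRun_mem L m hm (L - m*m*m).toNat (m*m*m) (by nlinarith) (by omega)]
        constructor
        · rintro ((h | ⟨j, rfl, hjl⟩) | ⟨b, hmb, p, hp3, rfl, hpl⟩)
          · exact Or.inl h
          · exact Or.inr ⟨m, le_refl m, j + 3, by omega, by ring, hjl⟩
          · exact Or.inr ⟨b, by omega, p, hp3, rfl, hpl⟩
        · rintro (h | ⟨b, hmb, p, hp3, rfl, hpl⟩)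
          · exact Or.inl (Or.inl h)
          · by_cases hbm : b = m
            · subst hbm
              refine Or.inl (Or.inr ⟨p - 3, ?_, ?_⟩)
              · rw [show b * b * b * b ^ (p - 3) = b ^ (p - 3 + 3) by ring]
                congr 1; omega
              · rw [show b * b * b * b ^ (p - 3) = b ^ (p - 3 + 3) by ring,
                    show p - 3 + 3 = p by omega]
                exact hpl
            · exact Or.inr ⟨b, by omega, p, hp3, rfl, hpl⟩
      · rw [pvHighers, dif_neg (by omega)]
        constructor
        · exact Or.inl
        · rintro (h | ⟨b, hmb, p, hp3, rfl, hpl⟩)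
          · exact h
          · exfalso
            have ha : m * m ≤ b * b := by nlinarith
            have h1 : m * m * m ≤ b * b * b := by nlinarith
            have h3 : b ^ 3 ≤ b ^ p := pow_le_pow_right₀ (by omega) hp3
            have h2 : b * b * b = b ^ 3 := by ring
            omega


-- the central equality: A's sorted set is B's merged list
lemma pvMain_eq (n : Int) (h2 : 2 ≤ n) (hub : n ≤ 2147483648) :
    PySem.List.sorted
      ((PySem.List.pyRange 2 (n + 2) 1).foldl
        (fun s i => pvInnerA i ((n + 1) ^ 2) (PySem.List.pyRange 2 100 1) s) PySem.Set.empty)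
      (fun x => x) false =
    pvMerge ((PySem.List.pyRange 2 (n + 1) 1).map (fun i => i * i))
      (PySem.List.sorted (pvHighers ((n + 1) * (n + 1)) 2 PySem.Set.empty) (fun x => x) false) := by
  set L : Int := (n + 1) ^ 2 with hL
  have hLL : (n + 1) * (n + 1) = L := by rw [hL]; ring
  rw [hLL]
  set setA := (PySem.List.pyRange 2 (n + 2) 1).foldl
      (fun s i => pvInnerA i L (PySem.List.pyRange 2 100 1) s) PySem.Set.empty with hsetA
  set highers := pvHighers L 2 PySem.Set.empty with hhighers
  set hs := PySem.List.sorted highers (fun x => x) false with hhs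
  set squares := (PySem.List.pyRange 2 (n + 1) 1).map (fun i => i * i) with hsquares
  have hL8 : (8:Int) < L := by rw [hL]; nlinarith
  -- membership characterizations
  have hsetA_mem : ∀ x, x ∈ setA ↔ pvIsPow L x := pvSetA_mem n h2 hub
  have hhighers_mem : ∀ x, x ∈ highers ↔ ∃ b : Int, 2 ≤ b ∧ ∃ p : Nat, 3 ≤ p ∧ x = b ^ p ∧ x < L := by
    intro x
    rw [hhighers, pvHighers_mem L (L - 8).toNat 2 (by omega) (by omega)]
    simp [PySem.Set.empty]
  have hhs_mem : ∀ x, x ∈ hs ↔ ∃ b : Int, 2 ≤ b ∧ ∃ p : Nat, 3 ≤ p ∧ x = b ^ p ∧ x < L := by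
    intro x
    rw [hhs, PySem.List.mem_sorted]
    exact hhighers_mem x
  have hsquares_mem : ∀ x, x ∈ squares ↔ ∃ i : Int, 2 ≤ i ∧ i < n + 1 ∧ x = i * i := by
    intro x
    rw [hsquares]
    simp only [List.mem_map, PySem.List.mem_pyRange_one]
    constructor
    · rintro ⟨i, ⟨h1, h2⟩, rfl⟩; exact ⟨i, h1, h2, rfl⟩
    · rintro ⟨i, h1, h2, rfl⟩; exact ⟨i, ⟨h1, h2⟩, rfl⟩
  -- nodup facts
  have hsetA_nodup : setA.Nodup := pvFoldA_nodup _ _ _ List.nodup_nil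
  have hhighers_nodup : highers.Nodup := pvHighers_nodup _ _ _ List.nodup_nil
  have hhs_nodup : hs.Nodup := by
    rw [hhs]
    exact (PySem.List.sorted_perm _ _ _).nodup_iff.mpr hhighers_nodup
  -- sortedness facts
  have hhs_pw : hs.Pairwise (· < ·) := by
    apply pvPairwise_lt_of_le_nodup _ _ hhs_nodup
    have := PySem.List.sorted_pairwise (xs := highers) (key := fun x : Int => x)
    simpa using this
  have hsquares_pw : squares.Pairwise (· < ·) := by
    rw [hsquares, List.pairwise_map]
    apply (PySem.List.pairwise_lt_pyRange_one 2 (n+1)).imp_of_mem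
    intro a b ha hb hab
    rw [PySem.List.mem_pyRange_one] at ha
    nlinarith [ha.1]
  have hmerged_pw : (pvMerge squares hs).Pairwise (· < ·) := pvMerge_pairwise _ _ hsquares_pw hhs_pw
  have hmerged_nodup : (pvMerge squares hs).Nodup := hmerged_pw.imp (fun h => ne_of_lt h)
  have hmerged_mem : ∀ x, x ∈ pvMerge squares hs ↔ pvIsPow L x := by
    intro x
    rw [pvMerge_mem, hsquares_mem, hhs_mem]
    constructor
    · rintro (⟨i, hi1, hi2, rfl⟩ | ⟨b, hb1, p, hp3, rfl, hpl⟩)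
      · refine ⟨i, 2, hi1, le_refl 2, by ring, ?_⟩
        rw [hL]; nlinarith
      · exact ⟨b, p, hb1, by omega, rfl, hpl⟩
    · rintro ⟨b, p, hb1, hp2, rfl, hpl⟩
      by_cases hp : p = 2
      · subst hp
        refine Or.inl ⟨b, hb1, ?_, by ring⟩
        by_contra hb
        rw [not_lt] at hb
        have : (n + 1) ^ 2 ≤ b ^ 2 := by nlinarith
        omega
      · exact Or.inr ⟨b, hb1, p, by omega, rfl, hpl⟩
  -- conclude
  apply PySem.List.sorted_eq_of_perm_of_pairwise_lt
  · exact (List.perm_ext_iff_of_nodup hmerged_nodup hsetA_nodup).mpr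
      (fun x => (hmerged_mem x).trans (hsetA_mem x).symm)
  · simpa using hmerged_pw

-- ===== VERDICT (by name: the statement is the Claim_ definition above) =====
theorem nth_power_num_long_spec : Claim_equal_nth_power_num_long := by
  intro n hdom hpre
  have h2 : 2 ≤ n := hpre
  have hub : n ≤ 2147483648 := (of_decide_eq_true hdom).2
  unfold Spec_nth_power_num_long nth_power_num_long nth_power_num_long_alt
  show (PySem.List.slice (PySem.List.sorted ((PySem.List.pyRange 2 (n + 2) 1).foldl
        (fun s i => pvInnerA i ((n + 1) ^ 2) (PySem.List.pyRange 2 100 1) s) PySem.Set.empty) (fun x => x) false) none (some n),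
      (PySem.List.pyGet? (PySem.List.sorted ((PySem.List.pyRange 2 (n + 2) 1).foldl
        (fun s i => pvInnerA i ((n + 1) ^ 2) (PySem.List.pyRange 2 100 1) s) PySem.Set.empty) (fun x => x) false) (n - 1)).getD 0) =
    (PySem.List.slice (pvMerge ((PySem.List.pyRange 2 (n + 1) 1).map (fun i => i * i))
        (PySem.List.sorted (pvHighers ((n + 1) * (n + 1)) 2 PySem.Set.empty) (fun x => x) false)) none (some n),
      (PySem.List.pyGet? (pvMerge ((PySem.List.pyRange 2 (n + 1) 1).map (fun i => i * i))
        (PySem.List.sorted (pvHighers ((n + 1) * (n + 1)) 2 PySem.Set.empty) (fun x => x) false)) (n - 1)).getD 0)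
  rw [pvMain_eq n h2 hub]
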